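-- pv_equiv track=rewrite | github.com/Saisoft-Global/neovision | backend/models/document_processor.py | _group_text_into_tables
-- ===== SOURCE A (Python) =====
-- from typing import Dict, Any, List, Optional, Tuple
--
-- def _group_text_into_tables(text_blocks: List[Dict]) -> List[List[Dict]]:
--     """Group text blocks into potential table structures."""
--     if not text_blocks:
--         return []
--
--     # Sort by Y position (top to bottom)
--     sorted_blocks = sorted(text_blocks, key=lambda x: x['center_y'])
--
--     tables = []
--     current_table = []
--     last_y = None
--     y_tolerance = 10  # Pixels
--
--     for block in sorted_blocks:
--         if last_y is None or abs(block['center_y'] - last_y) <= y_tolerance: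
--             # Same row or very close
--             current_table.append(block)
--             last_y = block['center_y']
--         else:
--             # New row detected
--             if len(current_table) >= 2:  # At least 2 columns
--                 tables.append(current_table)
--             current_table = [block]
--             last_y = block['center_y']
--
--     # Add the last table
--     if len(current_table) >= 2:
--         tables.append(current_table)
--
--     return tables
-- ===== SOURCE B (Python) =====
-- def _group_text_into_tables(text_blocks):
--     """Group text blocks into potential table structures."""
--     sorted_blocks = sorted(text_blocks, key=lambda x: x['center_y'])
--
--     tables = []
--     rest = sorted_blocks
--     while rest:
--         # peel the maximal chained prefix: extend while each neighbor gap <= 10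
--         k = 1
--         while k < len(rest) and abs(rest[k]['center_y'] - rest[k - 1]['center_y']) <= 10:
--             k += 1
--         if k >= 2:
--             tables.append(rest[:k])
--         rest = rest[k:]
--     return tables
-- ===== Notes on version B (the rewrite author's own statement) =====
-- stated objective: alternative
-- what changed: Replaces A's stateful accumulate/emit loop (Optional last_y, running current_table, end-of-loop flush) by repeatedly peeling the maximal chained prefix off the sorted list via an index scan and slicing, emitting each peeled run immediately if it has >= 2 blocks.
import Mathlib
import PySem

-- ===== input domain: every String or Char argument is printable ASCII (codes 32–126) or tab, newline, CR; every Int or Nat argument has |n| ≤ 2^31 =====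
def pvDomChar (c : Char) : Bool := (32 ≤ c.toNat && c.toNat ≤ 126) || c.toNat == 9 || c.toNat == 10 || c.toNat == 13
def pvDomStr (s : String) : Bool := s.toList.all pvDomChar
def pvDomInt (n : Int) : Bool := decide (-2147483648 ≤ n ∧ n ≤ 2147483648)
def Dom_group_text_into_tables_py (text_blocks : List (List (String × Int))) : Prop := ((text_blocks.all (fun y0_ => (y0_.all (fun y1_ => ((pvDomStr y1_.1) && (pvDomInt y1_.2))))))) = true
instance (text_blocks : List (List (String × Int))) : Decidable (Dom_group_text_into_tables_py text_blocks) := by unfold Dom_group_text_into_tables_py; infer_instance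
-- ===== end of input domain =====

-- B replaces A's stateful accumulate/emit loop by repeatedly peeling the maximal chained prefix off the sorted list (index scan + slice) and emitting it if it has ≥ 2 blocks.
-- ===== PORT A =====
-- x['center_y'] (key guaranteed present by Pre_; assoc-list first-match lookup)
def pvCY (b : List (String × Int)) : Int := (b.lookup "center_y").getD 0

-- the for-loop of A: state (tables, current_table, last_y), plus the final flush
def pvALoop : List (List (String × Int)) → List (List (List (String × Int))) →
    List (List (String × Int)) → Option Int → List (List (List (String × Int)))
  | [], tables, cur, _ => if cur.length ≥ 2 then tables ++ [cur] else tables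
  | b :: rest, tables, cur, last =>
    match last with
    | none => pvALoop rest tables (cur ++ [b]) (some (pvCY b))
    | some ly =>
      if |pvCY b - ly| ≤ 10 then pvALoop rest tables (cur ++ [b]) (some (pvCY b))
      else pvALoop rest (if cur.length ≥ 2 then tables ++ [cur] else tables) [b] (some (pvCY b))

def group_text_into_tables_py (text_blocks : List (List (String × Int))) : List (List (List (String × Int))) :=
  if text_blocks = [] then []
  else pvALoop (PySem.List.sorted text_blocks pvCY false) [] [] none

-- ===== PORT B =====
-- B's inner index scan: number of chained successors after a block with center_y = prev
def pvChainLen : Int → List (List (String × Int)) → Nat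
  | _, [] => 0
  | prev, b :: rest => if |pvCY b - prev| ≤ 10 then pvChainLen (pvCY b) rest + 1 else 0

-- B's outer while loop: peel the maximal chained prefix, emit it if length ≥ 2, continue on the rest
def pvPeel : List (List (String × Int)) → List (List (List (String × Int)))
  | [] => []
  | h :: t =>
    let k := pvChainLen (pvCY h) t + 1
    (if k ≥ 2 then [(h :: t).take k] else []) ++ pvPeel ((h :: t).drop k)
termination_by l => l.length
decreasing_by simp

def group_text_into_tables_py_alt (text_blocks : List (List (String × Int))) : List (List (List (String × Int))) :=
  pvPeel (PySem.List.sorted text_blocks pvCY false)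

-- ===== PRECONDITION & SPEC =====
-- Pre_: every block carries the 'center_y' key (otherwise Python A raises KeyError)
def Pre_group_text_into_tables_py (text_blocks : List (List (String × Int))) : Prop :=
  ∀ b ∈ text_blocks, (b.lookup "center_y").isSome
instance (text_blocks : List (List (String × Int))) : Decidable (Pre_group_text_into_tables_py text_blocks) := by
  unfold Pre_group_text_into_tables_py; infer_instance

def pvWitness_group_text_into_tables_py : (List (List (String × Int))) :=
  [[("center_y", 5), ("text", 0)], [("center_y", 40)], [("center_y", 8)]]

def Spec_group_text_into_tables_py (text_blocks : List (List (String × Int))) (out : List (List (List (String × Int)))) : Prop := out = group_text_into_tables_py_alt text_blocks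
instance (text_blocks : List (List (String × Int))) (out : List (List (List (String × Int)))) : Decidable (Spec_group_text_into_tables_py text_blocks out) := by unfold Spec_group_text_into_tables_py; infer_instance

-- ===== CLAIM (what is proved, stated in full; the proofs are below) =====
def Claim_equal_group_text_into_tables_py : Prop := ∀ (text_blocks : List (List (String × Int))), Dom_group_text_into_tables_py text_blocks → Pre_group_text_into_tables_py text_blocks → Spec_group_text_into_tables_py text_blocks (group_text_into_tables_py text_blocks)

-- ===== LEMMAS AND PROOFS =====
theorem pvPeel_nil : pvPeel [] = [] := by rw [pvPeel.eq_def]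

theorem pvPeel_cons (h : List (String × Int)) (t : List (List (String × Int))) :
    pvPeel (h :: t) =
      (if pvChainLen (pvCY h) t + 1 ≥ 2 then [h :: t.take (pvChainLen (pvCY h) t)] else [])
      ++ pvPeel (t.drop (pvChainLen (pvCY h) t)) := by
  rw [pvPeel.eq_def]; simp

-- A\'s loop (once started) equals: tables so far ++ (emit current run extended by its chained prefix) ++ peel of the remainder
theorem pvALoop_eq_peel (rest : List (List (String × Int)))
    (tables : List (List (List (String × Int)))) (cur : List (List (String × Int))) (ly : Int) :
    pvALoop rest tables cur (some ly) =
      tables ++ (if cur.length + pvChainLen ly rest ≥ 2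
                  then [cur ++ rest.take (pvChainLen ly rest)] else [])
             ++ pvPeel (rest.drop (pvChainLen ly rest)) := by
  induction rest generalizing tables cur ly with
  | nil =>
    simp only [pvALoop, pvChainLen, List.take_nil, List.drop_nil, pvPeel_nil,
      Nat.add_zero, List.append_nil]
    split_ifs with h <;> simp
  | cons b rest ih =>
    by_cases hgap : |pvCY b - ly| ≤ 10
    · simp only [pvALoop, pvChainLen, if_pos hgap]
      rw [ih]
      simp only [List.take_succ_cons, List.drop_succ_cons, List.append_assoc,
        List.cons_append, List.nil_append, List.length_append, List.length_cons,
        List.length_nil]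
      split_ifs <;> first | rfl | (exfalso; omega)
    · simp only [pvALoop, pvChainLen, if_neg hgap]
      rw [ih]
      simp only [Nat.add_zero, List.take_zero, List.drop_zero, List.append_nil]
      rw [pvPeel_cons]
      simp only [List.length_cons, List.length_nil, List.append_assoc,
        List.cons_append, List.nil_append]
      split_ifs <;> first | rfl | (exfalso; omega) | simp

theorem group_text_into_tables_py_spec : Claim_equal_group_text_into_tables_py := by
  intro tb _ _
  unfold Spec_group_text_into_tables_py group_text_into_tables_py group_text_into_tables_py_alt
  split_ifs with h
  · subst h
    have hs : PySem.List.sorted ([] : List (List (String × Int))) pvCY false = [] := by decide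
    rw [hs, pvPeel_nil]
  · cases hs : PySem.List.sorted tb pvCY false with
    | nil => simp [pvALoop, pvPeel_nil]
    | cons x t =>
      simp only [pvALoop]
      rw [pvALoop_eq_peel, pvPeel_cons]
      simp only [List.length_cons, List.length_nil, List.nil_append]
      split_ifs <;> first | rfl | (exfalso; omega)
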